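-- pv_equiv track=rewrite | github.com/SaiSrikarReddy/Image-Segmentation-for-a-Feedback-Form | segmentation_1/first.py | check
-- ===== SOURCE A (Python) =====
-- def check(m):
-- 	count = 0
-- 	for i in m:
-- 		if i > 200:
-- 			count = count + 1
-- 	if count == len(m) or count == 0:
-- 		return True
-- 	else:
-- 		return False
-- ===== SOURCE B (Python) =====
-- def check(m):
--     return all(i > 200 for i in m) or all(i <= 200 for i in m)
-- ===== Notes on version B (the rewrite author's own statement) =====
-- stated objective: simpler
-- what changed: Replaces the counter loop plus count==len/count==0 comparison with short-circuiting predicate uniformity: all elements > 200 or all <= 200.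
import Mathlib
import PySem

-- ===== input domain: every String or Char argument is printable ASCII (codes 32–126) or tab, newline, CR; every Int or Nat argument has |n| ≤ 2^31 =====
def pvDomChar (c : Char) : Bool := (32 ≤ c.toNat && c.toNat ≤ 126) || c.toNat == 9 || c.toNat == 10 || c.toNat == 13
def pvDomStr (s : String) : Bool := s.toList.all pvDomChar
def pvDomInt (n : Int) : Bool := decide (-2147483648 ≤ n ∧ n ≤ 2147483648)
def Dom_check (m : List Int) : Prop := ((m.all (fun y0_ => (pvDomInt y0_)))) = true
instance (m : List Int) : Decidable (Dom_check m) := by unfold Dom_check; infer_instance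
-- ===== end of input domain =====

-- B replaces A's counter loop with short-circuiting predicate uniformity (all > 200 or all ≤ 200): simpler, same cost.
-- ===== PORT A =====
def check (m : List Int) : Bool :=
  let count := m.foldl (fun count i => if i > 200 then count + 1 else count) (0 : Int)
  if count = (m.length : Int) ∨ count = 0 then true else false

-- ===== PORT B =====
def check_alt (m : List Int) : Bool :=
  m.all (fun i => decide (i > 200)) || m.all (fun i => decide (i ≤ 200))

-- ===== PRECONDITION & SPEC =====
def Spec_check (m : List Int) (out : Bool) : Prop := out = check_alt m
instance (m : List Int) (out : Bool) : Decidable (Spec_check m out) := by unfold Spec_check; infer_instance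

-- ===== CLAIM (what is proved, stated in full; the proofs are below) =====
def Claim_equal_check : Prop := ∀ (m : List Int), Dom_check m → Spec_check m (check m)

-- ===== LEMMAS AND PROOFS =====

-- ===== VERDICT (by name: the statement is the Claim_ definition above) =====
-- The counter after the fold equals start + (number of elements > 200).
lemma count_fold (m : List Int) (c : Int) :
    m.foldl (fun count i => if i > 200 then count + 1 else count) c
      = c + ((m.countP (fun i => decide (i > 200))) : Int) := by
  induction m generalizing c with
  | nil => simp
  | cons x xs ih =>
    simp only [List.foldl_cons, List.countP_cons, ih]
    by_cases h : x > 200 <;> simp [h] <;> ring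

lemma countP_eq_len_iff (m : List Int) :
    m.countP (fun i => decide (i > 200)) = m.length ↔ m.all (fun i => decide (i > 200)) = true := by
  rw [List.countP_eq_length, List.all_eq_true]

lemma countP_eq_zero_iff (m : List Int) :
    m.countP (fun i => decide (i > 200)) = 0 ↔ m.all (fun i => decide (i ≤ 200)) = true := by
  rw [List.countP_eq_zero, List.all_eq_true]
  constructor <;> intro h a ha <;> have := h a ha <;> simp_all

theorem check_spec : Claim_equal_check := by
  intro m _
  unfold Spec_check check check_alt
  simp only [count_fold, zero_add]
  by_cases h1 : m.countP (fun i => decide (i > 200)) = m.length <;>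
  by_cases h2 : m.countP (fun i => decide (i > 200)) = 0
  · have a1 := (countP_eq_len_iff m).mp h1
    have a2 := (countP_eq_zero_iff m).mp h2
    simp [a1, a2, h1]
  · have a1 := (countP_eq_len_iff m).mp h1
    have a2 : ¬ (m.all (fun i => decide (i ≤ 200)) = true) :=
      fun h => h2 ((countP_eq_zero_iff m).mpr h)
    simp [a1, a2, h1]
  · have a1 : ¬ (m.all (fun i => decide (i > 200)) = true) :=
      fun h => h1 ((countP_eq_len_iff m).mpr h)
    have a2 := (countP_eq_zero_iff m).mp h2
    simp [a1, a2, h2]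
  · have a1 : ¬ (m.all (fun i => decide (i > 200)) = true) :=
      fun h => h1 ((countP_eq_len_iff m).mpr h)
    have a2 : ¬ (m.all (fun i => decide (i ≤ 200)) = true) :=
      fun h => h2 ((countP_eq_zero_iff m).mpr h)
    have hl : (m.countP (fun i => decide (i > 200)) : Int) ≠ (m.length : Int) := by
      exact_mod_cast fun h => h1 (by exact_mod_cast h)
    have hz : (m.countP (fun i => decide (i > 200)) : Int) ≠ 0 := by
      exact_mod_cast h2
    simp only [hl, hz, or_self, if_false]
    symm
    simp only [Bool.or_eq_false_iff, Bool.not_eq_true] at a1 a2 ⊢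
    exact ⟨a1, a2⟩
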